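-- pv_equiv track=rewrite | github.com/alexis-turpin/clashofcode | fastest/fastest-chess_queen_threats.py | answer
-- ===== SOURCE A (Python) =====
-- import itertools
--
-- def answer(board):
--     next_board = [list('P' * 8) for _ in range(8)]
--     for row_idx, row in enumerate(board):
--         for column_idx, square in enumerate(row):
--             if square == '.':
--                 continue
--             next_board = remove_threats(next_board, row_idx, column_idx)
--     return next_board
--
-- def remove_threats(next_board, row_idx, column_idx):
--     for row_threat, column_threat in generate_threats(row_idx, column_idx):
--         next_board[row_threat][column_threat] = '.'
--     return next_board
--
-- def generate_threats(row_idx, column_idx):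
--     for idx in range(8):
--         yield (row_idx, idx)
--         yield (idx, column_idx)
--
--     for delta_row, delta_col in itertools.product([-1, 1], [-1, 1]):
--         new_row, new_col = row_idx, column_idx
--         while 0 <= new_row < 8 and 0 <= new_col < 8:
--             yield (new_row, new_col)
--             new_row += delta_row
--             new_col += delta_col
-- ===== SOURCE B (Python) =====
-- def answer(board):
--     rows, cols, diags, antis = set(), set(), set(), set()
--     for r, line in enumerate(board):
--         for c, ch in enumerate(line):
--             if ch != '.':
--                 rows.add(r)
--                 cols.add(c)
--                 diags.add(r - c)
--                 antis.add(r + c)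
--     return [['.' if r in rows or c in cols or r - c in diags or r + c in antis else 'P'
--              for c in range(8)]
--             for r in range(8)]
-- ===== Notes on version B (the rewrite author's own statement) =====
-- stated objective: simpler
-- what changed: Replaces A's per-queen painting of whole rows/columns and four directional diagonal walks over a mutable 8x8 board with one scan that collects queen rows, columns, diagonals (r-c) and anti-diagonals (r+c) into four sets, then builds each output cell by membership tests.
import Mathlib
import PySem

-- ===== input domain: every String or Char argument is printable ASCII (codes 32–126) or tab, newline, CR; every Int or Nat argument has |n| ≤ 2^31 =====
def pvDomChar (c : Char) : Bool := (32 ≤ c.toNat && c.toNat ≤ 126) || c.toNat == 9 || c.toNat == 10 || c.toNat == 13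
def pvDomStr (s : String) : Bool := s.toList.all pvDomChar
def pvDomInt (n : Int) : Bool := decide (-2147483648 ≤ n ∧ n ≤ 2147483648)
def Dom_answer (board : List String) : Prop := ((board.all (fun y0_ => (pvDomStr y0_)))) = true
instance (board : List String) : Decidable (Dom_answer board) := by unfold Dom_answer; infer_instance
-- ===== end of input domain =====

-- B replaces A's per-queen line-painting (O(#queens · board writes)) with four index sets
-- (rows / cols / diagonals / anti-diagonals) built in one scan and a per-cell membership test;
-- objective: simpler. Equivalence is proved on Pre_answer (boards whose queens lie inside the
-- 8x8 area; outside it A raises IndexError).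

-- ===== PORT A =====
-- next_board[r][c] = '.' ; out-of-range indices raise IndexError in Python (excluded by Pre_answer),
-- here pySetD/pyGetD are the total forms used only under that precondition.
def pySet2 (b : List (List String)) (r c : Int) : List (List String) :=
  PySem.List.pySetD b r (PySem.List.pySetD (PySem.List.pyGetD b r []) c ".")

-- the 'while 0 <= new_row < 8 and 0 <= new_col < 8' walk; fuel 8 is exact: the loop body
-- runs at most 8 times (each step moves the row by ±1 inside [0,8))
def diagWalk : Nat → Int → Int → Int → Int → List (Int × Int)
  | 0, _, _, _, _ => []
  | n + 1, r, c, dr, dc =>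
      if 0 ≤ r ∧ r < 8 ∧ 0 ≤ c ∧ c < 8 then (r, c) :: diagWalk n (r + dr) (c + dc) dr dc else []

def generate_threats (r c : Int) : List (Int × Int) :=
  ((PySem.List.pyRange 0 8 1).flatMap (fun i => [(r, i), (i, c)])) ++
  (([((-1 : Int), (-1 : Int)), (-1, 1), (1, -1), (1, 1)]).flatMap
    (fun d => diagWalk 8 r c d.1 d.2))

def remove_threats (nb : List (List String)) (r c : Int) : List (List String) :=
  (generate_threats r c).foldl (fun b t => pySet2 b t.1 t.2) nb

def answer (board : List String) : List (List String) :=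
  (PySem.List.enumerate board 0).foldl
    (fun nb p =>
      (PySem.List.enumerate p.2.toList 0).foldl
        (fun nb q => if q.2 = '.' then nb else remove_threats nb p.1 q.1) nb)
    (List.replicate 8 (List.replicate 8 "P"))

-- ===== PORT B =====
-- state = (rows, cols, diags, antis) : four Python sets
def bStep (st : PySem.Set Int × PySem.Set Int × PySem.Set Int × PySem.Set Int)
    (r c : Int) : PySem.Set Int × PySem.Set Int × PySem.Set Int × PySem.Set Int :=
  (PySem.Set.add st.1 r, PySem.Set.add st.2.1 c,
   PySem.Set.add st.2.2.1 (r - c), PySem.Set.add st.2.2.2 (r + c))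

def answer_alt (board : List String) : List (List String) :=
  let st :=
    (PySem.List.enumerate board 0).foldl
      (fun st p =>
        (PySem.List.enumerate p.2.toList 0).foldl
          (fun st q => if q.2 ≠ '.' then bStep st p.1 q.1 else st) st)
      (PySem.Set.empty, PySem.Set.empty, PySem.Set.empty, PySem.Set.empty)
  (PySem.List.pyRange 0 8 1).map (fun r =>
    (PySem.List.pyRange 0 8 1).map (fun c =>
      if r ∈ st.1 ∨ c ∈ st.2.1 ∨ r - c ∈ st.2.2.1 ∨ r + c ∈ st.2.2.2 then "." else "P"))

-- ===== PRECONDITION & SPEC =====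
-- Pre_answer excludes boards with a queen (non-'.' square) at row index ≥ 8 or column index ≥ 8:
-- there A raises IndexError (next_board has only 8 rows / 8 columns).
def Pre_answer (board : List String) : Prop :=
  ((board.drop 8).all (fun s => s.toList.all (· = '.'))
    && board.all (fun s => (s.toList.drop 8).all (· = '.'))) = true
instance (board : List String) : Decidable (Pre_answer board) := by unfold Pre_answer; infer_instance

def pvWitness_answer : List String :=
  ["Q.......", "........", "...R....", "........", "........", "........", "........", ".......k"]

def Spec_answer (board : List String) (out : List (List String)) : Prop := out = answer_alt board
instance (board : List String) (out : List (List String)) : Decidable (Spec_answer board out) := by unfold Spec_answer; infer_instance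

-- ===== CLAIM (what is proved, stated in full; the proofs are below) =====
def Claim_equal_answer : Prop := ∀ (board : List String), Dom_answer board → Pre_answer board → Spec_answer board (answer board)

-- ===== LEMMAS AND PROOFS =====

-- render a threat predicate as the 8x8 board
def render (f : Int → Int → Bool) : List (List String) :=
  (PySem.List.pyRange 0 8 1).map (fun r =>
    (PySem.List.pyRange 0 8 1).map (fun c => if f r c then "." else "P"))

def threatens (qr qc x y : Int) : Bool :=
  decide (x = qr) || decide (y = qc) || decide (x - y = qr - qc) || decide (x + y = qr + qc)

-- B's state predicate
def FSt (st : PySem.Set Int × PySem.Set Int × PySem.Set Int × PySem.Set Int) (x y : Int) : Bool :=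
  decide (x ∈ st.1) || decide (y ∈ st.2.1) || decide (x - y ∈ st.2.2.1) || decide (x + y ∈ st.2.2.2)

theorem render_congr {f g : Int → Int → Bool}
    (h : ∀ x y : Int, 0 ≤ x → x < 8 → 0 ≤ y → y < 8 → f x y = g x y) :
    render f = render g := by
  unfold render
  refine List.map_congr_left (fun r hr => ?_)
  rw [PySem.List.mem_pyRange_one] at hr
  refine List.map_congr_left (fun c hc => ?_)
  rw [PySem.List.mem_pyRange_one] at hc
  rw [h r c hr.1 hr.2 hc.1 hc.2]

theorem threats_range : ∀ (a b : Fin 8), ∀ t ∈ generate_threats (a : Int) (b : Int),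
    0 ≤ t.1 ∧ t.1 < 8 ∧ 0 ≤ t.2 ∧ t.2 < 8 := by decide

theorem threats_range' (qr qc : Int) (h1 : 0 ≤ qr) (h2 : qr < 8) (h3 : 0 ≤ qc) (h4 : qc < 8) :
    ∀ t ∈ generate_threats qr qc, 0 ≤ t.1 ∧ t.1 < 8 ∧ 0 ≤ t.2 ∧ t.2 < 8 := by
  have := threats_range ⟨qr.toNat, by omega⟩ ⟨qc.toNat, by omega⟩
  simpa [Int.toNat_of_nonneg h1, Int.toNat_of_nonneg h3] using this

theorem set_map_range8 {α : Type} (g : Int → α) (i : Int) (h0 : 0 ≤ i) (h8 : i < 8) (x : α) :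
    ((PySem.List.pyRange 0 8 1).map g).set i.toNat x
      = (PySem.List.pyRange 0 8 1).map (fun j => if j = i then x else g j) := by
  have hrange : PySem.List.pyRange 0 8 1 = [0, 1, 2, 3, 4, 5, 6, 7] := by decide
  lift i to ℕ using h0 with k
  have hk : k < 8 := by exact_mod_cast h8
  interval_cases k <;> simp [hrange]

theorem threats_mem : ∀ (a b x y : Fin 8),
    ((x : Int), (y : Int)) ∈ generate_threats (a : Int) (b : Int) ↔
      threatens (a : Int) (b : Int) (x : Int) (y : Int) = true := by decide

theorem threats_mem' (qr qc x y : Int) (h1 : 0 ≤ qr) (h2 : qr < 8) (h3 : 0 ≤ qc) (h4 : qc < 8)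
    (h5 : 0 ≤ x) (h6 : x < 8) (h7 : 0 ≤ y) (h8 : y < 8) :
    ((x, y) ∈ generate_threats qr qc) ↔ threatens qr qc x y = true := by
  have := threats_mem ⟨qr.toNat, by omega⟩ ⟨qc.toNat, by omega⟩ ⟨x.toNat, by omega⟩ ⟨y.toNat, by omega⟩
  simpa [Int.toNat_of_nonneg, h1, h3, h5, h7] using this

theorem paint_one (f : Int → Int → Bool) (r c : Int)
    (hr0 : 0 ≤ r) (hr8 : r < 8) (hc0 : 0 ≤ c) (hc8 : c < 8) :
    pySet2 (render f) r c =
      render (fun x y => f x y || (decide (x = r) && decide (y = c))) := by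
  unfold pySet2 render
  rw [PySem.List.pyGetD_map_pyRange_of_nonneg _ 8 r _ hr0 hr8,
    PySem.List.pySetD_of_nonneg _ _ hc0, PySem.List.pySetD_of_nonneg _ _ hr0,
    set_map_range8 _ c hc0 hc8, set_map_range8 _ r hr0 hr8]
  refine List.map_congr_left (fun j hj => ?_)
  by_cases hjr : j = r
  · subst hjr
    rw [if_pos rfl]
    refine List.map_congr_left (fun y hy => ?_)
    by_cases hyc : y = c <;> simp [hyc]
  · rw [if_neg hjr]
    refine List.map_congr_left (fun y hy => ?_)
    simp [hjr]

theorem paint_list (ts : List (Int × Int)) (f : Int → Int → Bool)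
    (h : ∀ t ∈ ts, 0 ≤ t.1 ∧ t.1 < 8 ∧ 0 ≤ t.2 ∧ t.2 < 8) :
    ts.foldl (fun b t => pySet2 b t.1 t.2) (render f) =
      render (fun x y => f x y || decide ((x, y) ∈ ts)) := by
  induction ts generalizing f with
  | nil => exact render_congr (fun x y _ _ _ _ => by simp)
  | cons t rest ih =>
      obtain ⟨h1, h2, h3, h4⟩ := h t List.mem_cons_self
      simp only [List.foldl_cons]
      rw [paint_one f t.1 t.2 h1 h2 h3 h4,
        ih _ (fun u hu => h u (List.mem_cons_of_mem _ hu))]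
      refine render_congr (fun x y _ _ _ _ => ?_)
      by_cases e1 : x = t.1 <;> by_cases e2 : y = t.2 <;> by_cases m : (x, y) ∈ rest <;>
        simp [List.mem_cons, Prod.ext_iff, e1, e2, m]

theorem remove_render (f : Int → Int → Bool) (qr qc : Int)
    (h0 : 0 ≤ qr) (h8 : qr < 8) (h0' : 0 ≤ qc) (h8' : qc < 8) :
    remove_threats (render f) qr qc =
      render (fun x y => f x y || threatens qr qc x y) := by
  unfold remove_threats
  rw [paint_list _ f (threats_range' qr qc h0 h8 h0' h8')]
  refine render_congr (fun x y hx0 hx8 hy0 hy8 => ?_)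
  have hiff := threats_mem' qr qc x y h0 h8 h0' h8' hx0 hx8 hy0 hy8
  by_cases m : (x, y) ∈ generate_threats qr qc
  · simp [m, hiff.1 m]
  · have hf : threatens qr qc x y = false := by
      rw [Bool.eq_false_iff]
      exact fun hth => m (hiff.2 hth)
    simp [m, hf]

theorem FSt_bStep (st) (qr qc x y : Int) :
    FSt (bStep st qr qc) x y = (FSt st x y || threatens qr qc x y) := by
  unfold FSt bStep threatens
  simp [PySem.Set.mem_add]
  by_cases h1 : x ∈ st.1 <;> by_cases h2 : y ∈ st.2.1 <;>
    by_cases h3 : x - y ∈ st.2.2.1 <;> by_cases h4 : x + y ∈ st.2.2.2 <;>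
    by_cases e1 : x = qr <;> by_cases e2 : y = qc <;>
    by_cases e3 : x - y = qr - qc <;> by_cases e4 : x + y = qr + qc <;>
    simp [h1, h2, h3, h4, e1, e2, e3, e4]

theorem inner_loop (r : Int) (cs : List (Int × Char)) (st)
    (hq : ∀ q ∈ cs, q.2 ≠ '.' → (0 ≤ r ∧ r < 8) ∧ 0 ≤ q.1 ∧ q.1 < 8) :
    cs.foldl (fun nb q => if q.2 = '.' then nb else remove_threats nb r q.1) (render (FSt st)) =
      render (FSt (cs.foldl (fun st q => if q.2 ≠ '.' then bStep st r q.1 else st) st)) := by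
  induction cs generalizing st with
  | nil => rfl
  | cons q rest ih =>
      simp only [List.foldl_cons]
      by_cases hdot : q.2 = '.'
      · rw [if_pos hdot, if_neg (by simp [hdot])]
        exact ih st (fun q hq' => hq q (List.mem_cons_of_mem _ hq'))
      · obtain ⟨⟨h1, h2⟩, h3, h4⟩ := hq q (List.mem_cons_self) hdot
        rw [if_neg hdot, if_pos hdot, remove_render _ _ _ h1 h2 h3 h4]
        have : render (fun x y => FSt st x y || threatens r q.1 x y) = render (FSt (bStep st r q.1)) :=
          render_congr (fun x y _ _ _ _ => (FSt_bStep st r q.1 x y).symm)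
        rw [this]
        exact ih _ (fun q hq' => hq q (List.mem_cons_of_mem _ hq'))

theorem outer_loop (rs : List (Int × String)) (st)
    (hq : ∀ p ∈ rs, ∀ q ∈ PySem.List.enumerate p.2.toList 0, q.2 ≠ '.' →
      (0 ≤ p.1 ∧ p.1 < 8) ∧ 0 ≤ q.1 ∧ q.1 < 8) :
    rs.foldl (fun nb p =>
        (PySem.List.enumerate p.2.toList 0).foldl
          (fun nb q => if q.2 = '.' then nb else remove_threats nb p.1 q.1) nb) (render (FSt st)) =
      render (FSt (rs.foldl (fun st p =>
        (PySem.List.enumerate p.2.toList 0).foldl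
          (fun st q => if q.2 ≠ '.' then bStep st p.1 q.1 else st) st) st)) := by
  induction rs generalizing st with
  | nil => rfl
  | cons p rest ih =>
      simp only [List.foldl_cons]
      rw [inner_loop p.1 _ st (fun q hq' => hq p List.mem_cons_self q hq')]
      exact ih _ (fun p hp => hq p (List.mem_cons_of_mem _ hp))

theorem init_render : List.replicate 8 (List.replicate 8 "P") = render (fun _ _ => false) := by decide

theorem FSt_empty (x y : Int) :
    FSt (PySem.Set.empty, PySem.Set.empty, PySem.Set.empty, PySem.Set.empty) x y = false := by
  simp [FSt, PySem.Set.empty]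

theorem pre_bounds (board : List String) (hpre : Pre_answer board) :
    ∀ p ∈ PySem.List.enumerate board 0, ∀ q ∈ PySem.List.enumerate p.2.toList 0,
      q.2 ≠ '.' → (0 ≤ p.1 ∧ p.1 < 8) ∧ 0 ≤ q.1 ∧ q.1 < 8 := by
  intro p hp q hq
  unfold Pre_answer at hpre
  simp only [Bool.and_eq_true, List.all_eq_true] at hpre
  obtain ⟨hrows, hcols⟩ := hpre
  rw [PySem.List.mem_enumerate_iff] at hp hq
  obtain ⟨k, hk, rfl⟩ := hp
  obtain ⟨j, hj, rfl⟩ := hq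
  intro hdot
  simp only [zero_add] at hdot ⊢
  have hj' : j < (board[k]).toList.length := by simpa using hj
  have hkj : k < 8 ∧ j < 8 := by
    constructor
    · by_contra hk8
      push Not at hk8
      have hmem : board[k] ∈ board.drop 8 := by
        refine List.mem_iff_getElem.mpr ⟨k - 8, by simp [List.length_drop]; omega, ?_⟩
        rw [List.getElem_drop]; congr 1; omega
      have := hrows _ hmem
      simp only [decide_eq_true_eq] at this
      exact hdot (this _ (List.getElem_mem hj'))
    · by_contra hj8
      push Not at hj8
      have hmem : (board[k]).toList[j] ∈ (board[k]).toList.drop 8 := by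
        refine List.mem_iff_getElem.mpr ⟨j - 8, by simp only [List.length_drop]; omega, ?_⟩
        rw [List.getElem_drop]; congr 1; omega
      have h2 := hcols _ (List.getElem_mem hk)
      simp only [decide_eq_true_eq] at h2
      exact hdot (h2 _ hmem)
  exact ⟨⟨by positivity, by exact_mod_cast hkj.1⟩, by positivity, by exact_mod_cast hkj.2⟩

-- ===== VERDICT (by name: the statement is the Claim_ definition above) =====
theorem answer_spec : Claim_equal_answer := by
  intro board _ hpre
  unfold Spec_answer answer answer_alt
  rw [init_render,
    render_congr (f := fun _ _ => false)
      (g := FSt (PySem.Set.empty, PySem.Set.empty, PySem.Set.empty, PySem.Set.empty))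
      (fun x y _ _ _ _ => (FSt_empty x y).symm),
    outer_loop _ _ (pre_bounds board hpre)]
  simp only [render, FSt, Bool.or_eq_true, decide_eq_true_eq, or_assoc]
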